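-- pv_equiv track=rewrite | github.com/KamilDemel/LeetCode-Grind | WDI_Fundamentals/double_base_palindrome_check.py | convert_to_binary_as_int
-- ===== SOURCE A (Python) =====
-- def convert_to_binary_as_int(number):
--     base = 2
--     result = 0
--     multiplier = 1
--     while number > 0:
--         result = result + (number % base) * multiplier
--         number = number // base
--         multiplier = multiplier * 10
--     return result
-- ===== SOURCE B (Python) =====
-- def convert_to_binary_as_int(number):
--     return int(bin(number)[2:]) if number > 0 else 0
-- ===== Notes on version B (the rewrite author's own statement) =====
-- stated objective: idiomatic
-- what changed: Replaces the arithmetic bit-extraction loop (mod/floordiv with a decimal multiplier accumulator) by a single library call: format the number in binary with bin() and reparse the digit string in base 10.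
import Mathlib
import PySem

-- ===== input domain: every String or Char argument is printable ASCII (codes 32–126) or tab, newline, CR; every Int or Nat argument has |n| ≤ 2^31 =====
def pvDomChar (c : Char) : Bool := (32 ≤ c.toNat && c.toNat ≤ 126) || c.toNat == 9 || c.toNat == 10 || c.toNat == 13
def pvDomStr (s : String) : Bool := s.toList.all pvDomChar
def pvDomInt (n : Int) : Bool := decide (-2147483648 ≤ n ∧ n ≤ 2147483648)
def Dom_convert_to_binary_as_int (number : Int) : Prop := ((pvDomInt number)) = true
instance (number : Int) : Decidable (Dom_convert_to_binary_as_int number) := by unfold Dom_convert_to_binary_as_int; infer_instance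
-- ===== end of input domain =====

-- B replaces A's arithmetic bit-extraction loop with the idiomatic library form:
-- binary-format the number and reparse the digit string in base 10. Same values everywhere.

-- ===== PORT A =====
-- the while loop of A, recursing on the shrinking `number`
def pvALoop (number result multiplier : Int) : Int :=
  if h : number > 0 then
    pvALoop (PySem.Int.floordiv number 2)
            (result + (PySem.Int.mod number 2) * multiplier)
            (multiplier * 10)
  else result
termination_by number.toNat
decreasing_by
  have h2 : PySem.Int.floordiv number 2 = number / 2 :=
    PySem.Int.floordiv_eq_ediv_of_pos (by omega)
  rw [h2]; omega

def convert_to_binary_as_int (number : Int) : Int := pvALoop number 0 1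

-- ===== PORT B =====
-- bin(n)[2:] for n > 0: the binary digit characters, most significant first
def pvBinChars (n : Nat) : List Char :=
  if n = 0 then []
  else pvBinChars (n / 2) ++ [if n % 2 = 1 then '1' else '0']

-- int(s) for a string of decimal digits (here only '0'/'1' occur)
def pvParseDec (cs : List Char) : Int :=
  cs.foldl (fun acc c => acc * 10 + ((c.toNat : Int) - 48)) 0

def convert_to_binary_as_int_alt (number : Int) : Int :=
  if number > 0 then pvParseDec (pvBinChars number.toNat) else 0

-- ===== PRECONDITION & SPEC =====
def Spec_convert_to_binary_as_int (number : Int) (out : Int) : Prop := out = convert_to_binary_as_int_alt number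
instance (number : Int) (out : Int) : Decidable (Spec_convert_to_binary_as_int number out) := by unfold Spec_convert_to_binary_as_int; infer_instance

-- ===== CLAIM (what is proved, stated in full; the proofs are below) =====
def Claim_equal_convert_to_binary_as_int : Prop := ∀ (number : Int), Dom_convert_to_binary_as_int number → Spec_convert_to_binary_as_int number (convert_to_binary_as_int number)

-- ===== LEMMAS AND PROOFS =====

-- the common value: the decimal number whose digits are n's binary digits
def pvD (n : Nat) : Int :=
  if n = 0 then 0 else (n % 2 : Nat) + 10 * pvD (n / 2)

lemma pvParseDec_append_digit (cs : List Char) (c : Char) :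
    pvParseDec (cs ++ [c]) = pvParseDec cs * 10 + ((c.toNat : Int) - 48) := by
  simp [pvParseDec]

lemma pvParseDec_binChars (n : Nat) : pvParseDec (pvBinChars n) = pvD n := by
  induction n using Nat.strong_induction_on with
  | _ n ih =>
    rw [pvBinChars, pvD]
    by_cases h : n = 0
    · simp [h, pvParseDec]
    · simp only [h, if_false]
      rw [pvParseDec_append_digit, ih (n / 2) (Nat.div_lt_self (by omega) (by omega))]
      rcases Nat.mod_two_eq_zero_or_one n with h2 | h2 <;> simp [h2] <;> ring

lemma pvALoop_eq (n : Nat) : ∀ (number result multiplier : Int),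
    number.toNat = n → pvALoop number result multiplier = result + multiplier * pvD n := by
  induction n using Nat.strong_induction_on with
  | _ n ih =>
    intro number result multiplier hn
    rw [pvALoop]
    by_cases h : number > 0
    · have hfd : PySem.Int.floordiv number 2 = number / 2 :=
        PySem.Int.floordiv_eq_ediv_of_pos (by omega)
      have hmd : PySem.Int.mod number 2 = number % 2 :=
        PySem.Int.mod_eq_emod_of_pos (by omega)
      have hnpos : n ≠ 0 := by omega
      have hlt : (number / 2).toNat < n := by omega
      have hmod : number % 2 = ((n % 2 : Nat) : Int) := by omega
      have hdiv : (number / 2).toNat = n / 2 := by omega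
      rw [dif_pos h, hfd, hmd, ih _ hlt _ _ _ rfl, hdiv, hmod]
      conv_rhs => rw [pvD]
      rw [if_neg hnpos]; ring
    · rw [dif_neg h]
      have : n = 0 := by omega
      simp [this, pvD]

theorem pvEquiv (number : Int) :
    convert_to_binary_as_int number = convert_to_binary_as_int_alt number := by
  unfold convert_to_binary_as_int convert_to_binary_as_int_alt
  rw [pvALoop_eq number.toNat number 0 1 rfl, pvParseDec_binChars]
  by_cases h : number > 0
  · simp [h]
  · have : number.toNat = 0 := by omega
    simp [h, this, pvD]

-- ===== VERDICT (by name: the statement is the Claim_ definition above) =====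
theorem convert_to_binary_as_int_spec : Claim_equal_convert_to_binary_as_int := by
  intro number _
  unfold Spec_convert_to_binary_as_int
  exact pvEquiv number
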